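-- pv_equiv track=rewrite | github.com/KeigoUtdMa/TweetsClusteringUsing_KMeans | Tweet_Cluster_K_Means.py | tweetUnion
-- ===== SOURCE A (Python) =====
-- def tweetUnion(tweet1, tweet2):
--     result = 0
--     for word in tweet1:
--         if word in tweet2:
--             result = result + max(tweet1[word], tweet2[word])
--             tweet2.pop(word, None)
--         else:
--             result = result + tweet1[word]
--     for word in tweet2:
--         result = result + tweet2[word]
--     return result
-- ===== SOURCE B (Python) =====
-- def tweetUnion(tweet1, tweet2):
--     # same return value as A; mutates tweet2 (pops shared keys) exactly like A
--     result = sum(tweet1.values()) + sum(tweet2.values())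
--     for word in tweet1:
--         if word in tweet2:
--             result -= min(tweet1[word], tweet2[word])
--             tweet2.pop(word, None)
--     return result
-- ===== Notes on version B (the rewrite author's own statement) =====
-- stated objective: simpler
-- what changed: B sums all values of both dicts up front and then corrects each shared key by subtracting min(v1,v2) (using max(a,b)=a+b-min(a,b)), removing A's per-key max selection and A's entire second loop over the leftover tweet2.
import Mathlib
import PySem

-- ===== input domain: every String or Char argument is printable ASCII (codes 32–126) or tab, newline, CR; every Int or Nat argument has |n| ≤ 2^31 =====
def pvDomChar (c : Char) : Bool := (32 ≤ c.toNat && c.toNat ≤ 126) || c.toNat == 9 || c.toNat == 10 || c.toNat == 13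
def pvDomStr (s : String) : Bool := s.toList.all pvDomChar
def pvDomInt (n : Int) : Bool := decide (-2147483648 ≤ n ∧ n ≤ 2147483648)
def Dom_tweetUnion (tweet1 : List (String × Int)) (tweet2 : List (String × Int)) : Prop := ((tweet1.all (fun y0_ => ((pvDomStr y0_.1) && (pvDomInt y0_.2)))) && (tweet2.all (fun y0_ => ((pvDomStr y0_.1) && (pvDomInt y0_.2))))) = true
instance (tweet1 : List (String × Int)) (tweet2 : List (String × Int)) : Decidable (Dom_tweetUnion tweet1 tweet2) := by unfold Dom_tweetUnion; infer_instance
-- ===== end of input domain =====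

-- B sums all values of both dicts up front and corrects each shared key by subtracting min(v1,v2)
-- (max(a,b)=a+b-min(a,b)), removing A's per-key max and A's second loop. Return-value equivalence only:
-- both Pythons mutate tweet2 identically (they pop the shared keys).


-- ===== PORT A =====
-- d[w] for a key known to be present: first-match value (the 0 default is unreachable in both ports)
def pvGet (t : List (String × Int)) (w : String) : Int :=
  match t.find? (fun p => p.1 == w) with
  | some p => p.2
  | none => 0

-- 'w in d' on the association list
def pvHas (t : List (String × Int)) (w : String) : Bool := t.any (fun p => p.1 == w)

-- d.pop(w, None): drop the (unique) entry with key w (first match on a list)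
def pvPop (t : List (String × Int)) (w : String) : List (String × Int) :=
  t.eraseP (fun p => p.1 == w)

def tweetUnion (tweet1 : List (String × Int)) (tweet2 : List (String × Int)) : Int :=
  -- first loop: state (result, tweet2)
  let st := tweet1.foldl (fun (st : Int × List (String × Int)) p =>
      if pvHas st.2 p.1 then
        (st.1 + max (pvGet tweet1 p.1) (pvGet st.2 p.1), pvPop st.2 p.1)
      else
        (st.1 + pvGet tweet1 p.1, st.2)) (0, tweet2)
  -- second loop: for word in tweet2: result += tweet2[word]
  st.2.foldl (fun acc p => acc + pvGet st.2 p.1) st.1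

-- ===== PORT B =====
-- sum(d.values())
def pvSumVals (t : List (String × Int)) : Int := t.foldl (fun acc p => acc + p.2) 0

def tweetUnion_alt (tweet1 : List (String × Int)) (tweet2 : List (String × Int)) : Int :=
  let total := pvSumVals tweet1 + pvSumVals tweet2
  (tweet1.foldl (fun (st : Int × List (String × Int)) p =>
      if pvHas st.2 p.1 then
        (st.1 - min (pvGet tweet1 p.1) (pvGet st.2 p.1), pvPop st.2 p.1)
      else st) (total, tweet2)).1

-- ===== PRECONDITION & SPEC =====
-- Pre_ excludes association lists with duplicate keys: both arguments are Python dicts,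
-- whose key lists are always duplicate-free, so no Python input is excluded.
def Pre_tweetUnion (tweet1 : List (String × Int)) (tweet2 : List (String × Int)) : Prop :=
  (tweet1.map Prod.fst).Nodup ∧ (tweet2.map Prod.fst).Nodup
instance (tweet1 : List (String × Int)) (tweet2 : List (String × Int)) : Decidable (Pre_tweetUnion tweet1 tweet2) := by unfold Pre_tweetUnion; infer_instance

def pvWitness_tweetUnion : (List (String × Int)) × (List (String × Int)) :=
  ([("hello", 2), ("world", 1)], [("world", 3), ("bye", 1)])

def Spec_tweetUnion (tweet1 : List (String × Int)) (tweet2 : List (String × Int)) (out : Int) : Prop := out = tweetUnion_alt tweet1 tweet2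
instance (tweet1 : List (String × Int)) (tweet2 : List (String × Int)) (out : Int) : Decidable (Spec_tweetUnion tweet1 tweet2 out) := by unfold Spec_tweetUnion; infer_instance

-- ===== CLAIM (what is proved, stated in full; the proofs are below) =====
def Claim_equal_tweetUnion : Prop := ∀ (tweet1 : List (String × Int)) (tweet2 : List (String × Int)), Dom_tweetUnion tweet1 tweet2 → Pre_tweetUnion tweet1 tweet2 → Spec_tweetUnion tweet1 tweet2 (tweetUnion tweet1 tweet2)

-- ===== LEMMAS AND PROOFS =====

theorem sumVals_eq (t : List (String × Int)) : pvSumVals t = (t.map Prod.snd).sum := by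
  unfold pvSumVals
  rw [PySem.List.foldl_add t (Prod.snd : String × Int → Int) 0]
  simp

theorem get_cons_ne (p : String × Int) (rest : List (String × Int)) (w : String)
    (hw : ¬ p.1 = w) : pvGet (p :: rest) w = pvGet rest w := by
  simp [pvGet, List.find?, show (p.1 == w) = false by simpa using hw]

theorem sumVals_pop (t : List (String × Int)) (w : String) (h : pvHas t w = true) :
    pvSumVals (pvPop t w) = pvSumVals t - pvGet t w := by
  induction t with
  | nil => simp [pvHas] at h
  | cons p rest ih =>
    by_cases hw : p.1 = w
    · simp [pvPop, pvGet, hw, sumVals_eq, List.find?]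
    · have h' : pvHas rest w = true := by
        simp [pvHas] at h ⊢
        rcases h with h | h
        · exact absurd h hw
        · exact h
      have hrec := ih h'
      rw [get_cons_ne p rest w hw]
      have hpop : pvPop (p :: rest) w = p :: pvPop rest w := by
        simp [pvPop, show (p.1 == w) = false by simpa using hw]
      rw [hpop]
      simp only [sumVals_eq, List.map_cons, List.sum_cons] at hrec ⊢
      omega

theorem sum_map_get_self (t1 : List (String × Int)) (h : (t1.map Prod.fst).Nodup) :
    (t1.map (fun p => pvGet t1 p.1)).sum = pvSumVals t1 := by
  induction t1 with
  | nil => simp [pvSumVals]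
  | cons p rest ih =>
    simp only [List.map_cons, List.nodup_cons] at h
    have hget : pvGet (p :: rest) p.1 = p.2 := by simp [pvGet, List.find?]
    have hmap : rest.map (fun q => pvGet (p :: rest) q.1) = rest.map (fun q => pvGet rest q.1) := by
      apply List.map_congr_left
      intro q hq
      exact get_cons_ne p rest q.1 (fun he => h.1 (he ▸ List.mem_map_of_mem hq))
    simp [hget, hmap, ih h.2, sumVals_eq]

theorem nodup_pop (t : List (String × Int)) (w : String) (h : (t.map Prod.fst).Nodup) :
    ((pvPop t w).map Prod.fst).Nodup := by
  exact (List.Sublist.map Prod.fst (List.eraseP_sublist)).nodup h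

theorem keySum_eq_sumVals (t : List (String × Int)) (h : (t.map Prod.fst).Nodup) (r : Int) :
    t.foldl (fun acc p => acc + pvGet t p.1) r = r + pvSumVals t := by
  rw [PySem.List.foldl_add t (fun p => pvGet t p.1) r, sum_map_get_self t h]

theorem loop_inv (t1 : List (String × Int)) (l : List (String × Int))
    (tw2 : List (String × Int)) (r s : Int)
    (hn : (tw2.map Prod.fst).Nodup)
    (hs : s = r + (l.map (fun p => pvGet t1 p.1)).sum + pvSumVals tw2) :
    (let stA := l.foldl (fun (st : Int × List (String × Int)) p =>
        if pvHas st.2 p.1 then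
          (st.1 + max (pvGet t1 p.1) (pvGet st.2 p.1), pvPop st.2 p.1)
        else (st.1 + pvGet t1 p.1, st.2)) (r, tw2)
     stA.2.foldl (fun acc p => acc + pvGet stA.2 p.1) stA.1)
    = (l.foldl (fun (st : Int × List (String × Int)) p =>
        if pvHas st.2 p.1 then
          (st.1 - min (pvGet t1 p.1) (pvGet st.2 p.1), pvPop st.2 p.1)
        else st) (s, tw2)).1 := by
  induction l generalizing tw2 r s with
  | nil =>
    simp only [List.foldl_nil]
    rw [keySum_eq_sumVals tw2 hn r]
    simp at hs
    omega
  | cons p l ih =>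
    simp only [List.foldl_cons]
    by_cases hc : pvHas tw2 p.1 = true
    · simp only [hc, if_true]
      apply ih (pvPop tw2 p.1) _ _ (nodup_pop tw2 p.1 hn)
      rw [sumVals_pop tw2 p.1 hc]
      simp only [List.map_cons, List.sum_cons] at hs
      have := max_add_min (pvGet t1 p.1) (pvGet tw2 p.1)
      omega
    · rw [if_neg hc, if_neg hc]
      apply ih tw2 _ _ hn
      simp only [List.map_cons, List.sum_cons] at hs
      omega

-- ===== VERDICT (by name: the statement is the Claim_ definition above) =====
theorem tweetUnion_spec : Claim_equal_tweetUnion := by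
  intro t1 t2 _ hpre
  unfold Spec_tweetUnion tweetUnion tweetUnion_alt
  have := loop_inv t1 t1 t2 0 (pvSumVals t1 + pvSumVals t2) hpre.2
    (by rw [sum_map_get_self t1 hpre.1]; ring)
  simpa using this
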